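-- pv_equiv track=rewrite | github.com/enkiv2/misc | ds-lib/SpanOps.py | concatextIdx2SpanIdx
-- ===== SOURCE A (Python) =====
-- def concatextIdx2SpanIdx(threespans, idx):
-- 	"""
-- 	a threespan is a tuple of form (source, start, length);
-- 	a concatext is a document made by concatenating a series of spans from different sources
--
-- 	this function takes the threespans representing the concatext & an index into it, and
-- 	returns an index into an individual source document in the form of a zero-length threespan
-- 	"""
-- 	ax=0
-- 	for tsp in threespans:
-- 		i=ax+tsp[2]
-- 		if(i==idx):
-- 			return (tsp[0], tsp[1]+tsp[2], 0)
-- 		if(i>idx):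
-- 			delta=tsp[2]-(i-idx)
-- 			return (tsp[0], tsp[1]+delta, 0)
-- 		ax=i
-- 	return None
-- ===== SOURCE B (Python) =====
-- def concatextIdx2SpanIdx(threespans, idx):
--     # Build the table of cumulative end offsets, then binary-search it for the
--     # first span whose cumulative end is >= idx (bisect_left by hand).
--     ends = []
--     total = 0
--     for tsp in threespans:
--         total += tsp[2]
--         ends.append(total)
--     lo, hi = 0, len(ends)
--     while lo < hi:
--         mid = (lo + hi) // 2
--         if ends[mid] < idx:
--             lo = mid + 1
--         else:
--             hi = mid
--     if lo == len(ends):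
--         return None
--     prev = ends[lo - 1] if lo > 0 else 0
--     tsp = threespans[lo]
--     return (tsp[0], tsp[1] + (idx - prev), 0)
-- ===== Notes on version B (the rewrite author's own statement) =====
-- stated objective: alternative
-- what changed: Replaces A's single linear scan carrying an accumulator and two return branches by precomputing the table of cumulative span end offsets and binary-searching it (hand-written bisect_left) for the first span whose cumulative end is >= idx.
-- outside the precondition, e.g. on concatextIdx2SpanIdx([(0, 0, 5), (1, 0, -4), (2, 0, 5)], 2): A returns (0, 2, 0), B returns (2, 1, 0)
import Mathlib
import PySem

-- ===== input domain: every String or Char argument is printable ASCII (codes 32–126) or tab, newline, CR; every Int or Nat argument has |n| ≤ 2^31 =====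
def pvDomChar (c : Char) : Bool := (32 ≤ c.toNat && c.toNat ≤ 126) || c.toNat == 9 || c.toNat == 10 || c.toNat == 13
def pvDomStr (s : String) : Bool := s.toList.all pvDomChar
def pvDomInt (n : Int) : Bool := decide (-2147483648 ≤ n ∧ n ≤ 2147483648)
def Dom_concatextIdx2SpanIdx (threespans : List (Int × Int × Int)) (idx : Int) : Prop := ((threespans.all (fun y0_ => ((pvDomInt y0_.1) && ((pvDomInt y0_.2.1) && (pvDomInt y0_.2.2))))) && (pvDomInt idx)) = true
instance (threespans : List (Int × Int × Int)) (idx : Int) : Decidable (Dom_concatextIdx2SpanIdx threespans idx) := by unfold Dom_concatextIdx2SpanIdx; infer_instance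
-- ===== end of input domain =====

-- B rebuilds A's answer from a precomputed cumulative-end-offset table plus a
-- hand-written bisect_left (alternative decomposition; return value only, no mutation).

-- ===== PORT A =====
-- the 'for tsp in threespans' loop with its running accumulator ax
def pvALoop (l : List (Int × Int × Int)) (ax : Int) (idx : Int) : Option (Int × Int × Int) :=
  match l with
  | [] => none                                   -- loop ends: return None
  | tsp :: rest =>
    let i := ax + tsp.2.2
    if i = idx then some (tsp.1, tsp.2.1 + tsp.2.2, 0)
    else if i > idx then
      let delta := tsp.2.2 - (i - idx)
      some (tsp.1, tsp.2.1 + delta, 0)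
    else pvALoop rest i idx

def concatextIdx2SpanIdx (threespans : List (Int × Int × Int)) (idx : Int) : Option (Int × Int × Int) :=
  pvALoop threespans 0 idx

-- ===== PORT B =====
-- the 'while lo < hi' bisect_left loop of Source B (list indexing is in range by construction)
def pvBsearch (ends : List Int) (idx : Int) (lo hi : Nat) : Nat :=
  if _h : lo < hi then
    let mid := (lo + hi) / 2
    if ends.getD mid 0 < idx then pvBsearch ends idx (mid + 1) hi
    else pvBsearch ends idx lo mid
  else lo
termination_by hi - lo
decreasing_by all_goals omega

def concatextIdx2SpanIdx_alt (threespans : List (Int × Int × Int)) (idx : Int) : Option (Int × Int × Int) :=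
  -- first loop of Source B: build the cumulative end-offset table
  let ends := (threespans.foldl (fun (st : List Int × Int) tsp =>
    (st.1 ++ [st.2 + tsp.2.2], st.2 + tsp.2.2)) ([], 0)).1
  let lo := pvBsearch ends idx 0 ends.length
  if lo = ends.length then none
  else
    let prev := if lo > 0 then ends.getD (lo - 1) 0 else 0
    let tsp := threespans.getD lo (0, 0, 0)
    some (tsp.1, tsp.2.1 + (idx - prev), 0)

-- ===== PRECONDITION & SPEC =====
-- Pre_ restricts to the task's natural domain: every span length is nonnegative.
-- On spans of negative length the cumulative-end table is unsorted, so B's binary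
-- search may attribute idx to a different span than A's linear scan.
def Pre_concatextIdx2SpanIdx (threespans : List (Int × Int × Int)) (idx : Int) : Prop :=
  ∀ tsp ∈ threespans, 0 ≤ tsp.2.2
instance (threespans : List (Int × Int × Int)) (idx : Int) : Decidable (Pre_concatextIdx2SpanIdx threespans idx) := by unfold Pre_concatextIdx2SpanIdx; infer_instance

def pvWitness_concatextIdx2SpanIdx : (List (Int × Int × Int)) × Int := ([(0, 0, 3), (1, 5, 2)], 4)

def Spec_concatextIdx2SpanIdx (threespans : List (Int × Int × Int)) (idx : Int) (out : Option (Int × Int × Int)) : Prop := out = concatextIdx2SpanIdx_alt threespans idx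
instance (threespans : List (Int × Int × Int)) (idx : Int) (out : Option (Int × Int × Int)) : Decidable (Spec_concatextIdx2SpanIdx threespans idx out) := by unfold Spec_concatextIdx2SpanIdx; infer_instance

-- ===== CLAIM (what is proved, stated in full; the proofs are below) =====
def Claim_equal_concatextIdx2SpanIdx : Prop := ∀ (threespans : List (Int × Int × Int)) (idx : Int), Dom_concatextIdx2SpanIdx threespans idx → Pre_concatextIdx2SpanIdx threespans idx → Spec_concatextIdx2SpanIdx threespans idx (concatextIdx2SpanIdx threespans idx)

-- ===== LEMMAS AND PROOFS =====

-- reference form of the cumulative-end table, starting from offset ax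
def pvEnds (l : List (Int × Int × Int)) (ax : Int) : List Int :=
  match l with
  | [] => []
  | tsp :: rest => (ax + tsp.2.2) :: pvEnds rest (ax + tsp.2.2)

lemma pvEnds_length (l : List (Int × Int × Int)) (ax : Int) :
    (pvEnds l ax).length = l.length := by
  induction l generalizing ax with
  | nil => rfl
  | cons t r ih => simp [pvEnds, ih]

lemma pvFold_eq (l : List (Int × Int × Int)) (acc : List Int) (ax : Int) :
    l.foldl (fun (st : List Int × Int) tsp =>
      (st.1 ++ [st.2 + tsp.2.2], st.2 + tsp.2.2)) (acc, ax)
      = (acc ++ pvEnds l ax, ax + (l.map (·.2.2)).sum) := by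
  induction l generalizing acc ax with
  | nil => simp [pvEnds]
  | cons t r ih => simp [pvEnds, ih, List.append_assoc]; ring

lemma pvEnds_ge (l : List (Int × Int × Int)) (ax : Int)
    (h : ∀ tsp ∈ l, 0 ≤ tsp.2.2) :
    ∀ j < l.length, ax ≤ (pvEnds l ax).getD j 0 := by
  induction l generalizing ax with
  | nil => intro j hj; simp at hj
  | cons t r ih =>
    intro j hj
    cases j with
    | zero => have := h t (by simp); simp [pvEnds]; omega
    | succ j =>
      have h1 := ih (ax + t.2.2) (fun x hx => h x (by simp [hx])) j (by simpa using hj)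
      have h2 : (0:Int) ≤ t.2.2 := h t (by simp)
      simp [pvEnds] at h1 ⊢; omega

lemma pvEnds_mono (l : List (Int × Int × Int)) (ax : Int)
    (h : ∀ tsp ∈ l, 0 ≤ tsp.2.2) :
    ∀ i j, i ≤ j → j < l.length → (pvEnds l ax).getD i 0 ≤ (pvEnds l ax).getD j 0 := by
  induction l generalizing ax with
  | nil => intro i j _ hj; simp at hj
  | cons t r ih =>
    intro i j hij hj
    cases j with
    | zero => interval_cases i; rfl
    | succ j =>
      cases i with
      | zero =>
        have := pvEnds_ge r (ax + t.2.2) (fun x hx => h x (by simp [hx])) j (by simpa using hj)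
        simpa [pvEnds] using this
      | succ i =>
        have := ih (ax + t.2.2) (fun x hx => h x (by simp [hx])) i j (by omega) (by simpa using hj)
        simpa [pvEnds] using this

-- bisect_left invariant: the result r separates the (< idx) prefix from the (≥ idx) suffix
lemma pvBsearch_spec (ends : List Int) (idx : Int) (lo hi : Nat)
    (hmono : ∀ i j, i ≤ j → j < ends.length → ends.getD i 0 ≤ ends.getD j 0)
    (hhi : hi ≤ ends.length) (hlh : lo ≤ hi)
    (hlo : ∀ j < lo, ends.getD j 0 < idx)
    (hsuf : ∀ j, hi ≤ j → j < ends.length → idx ≤ ends.getD j 0) :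
    (∀ j < pvBsearch ends idx lo hi, ends.getD j 0 < idx) ∧
    (∀ j, pvBsearch ends idx lo hi ≤ j → j < ends.length → idx ≤ ends.getD j 0) ∧
    pvBsearch ends idx lo hi ≤ ends.length := by
  induction lo, hi using pvBsearch.induct ends idx with
  | case1 lo hi h mid hm ih =>
    rw [pvBsearch, dif_pos h]
    rw [if_pos (show ends.getD ((lo + hi) / 2) 0 < idx from hm)]
    exact ih (by omega) (by omega)
      (by intro j hj
          by_cases hjl : j < lo
          · exact hlo j hjl
          · calc ends.getD j 0 ≤ ends.getD mid 0 := hmono j mid (by omega) (by omega)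
                 _ < idx := hm)
      hsuf
  | case2 lo hi h mid hm ih =>
    rw [pvBsearch, dif_pos h]
    rw [if_neg (show ¬ ends.getD ((lo + hi) / 2) 0 < idx from hm)]
    exact ih (by omega) (by omega) hlo
        (by intro j hj hjlen
            by_cases hjh : hi ≤ j
            · exact hsuf j hjh hjlen
            · calc idx ≤ ends.getD mid 0 := by omega
                   _ ≤ ends.getD j 0 := hmono mid j (by omega) hjlen)
  | case3 lo hi h =>
    rw [pvBsearch, dif_neg h]
    exact ⟨hlo, fun j hj hjlen => hsuf j (by omega) hjlen, by omega⟩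

-- A's loop, characterised by any separator index k of the cumulative-end table
lemma pvALoop_char (l : List (Int × Int × Int)) (ax idx : Int) (k : Nat)
    (hk : k ≤ l.length)
    (hlt : ∀ j < k, (pvEnds l ax).getD j 0 < idx)
    (hge : k < l.length → idx ≤ (pvEnds l ax).getD k 0) :
    pvALoop l ax idx =
      (if k = l.length then none
       else
         let prev := if k > 0 then (pvEnds l ax).getD (k - 1) 0 else ax
         let tsp := l.getD k (0, 0, 0)
         some (tsp.1, tsp.2.1 + (idx - prev), 0)) := by
  induction l generalizing ax k with
  | nil =>
    have : k = 0 := by simpa using hk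
    simp [pvALoop, this]
  | cons t r ih =>
    by_cases hk0 : k = 0
    · subst hk0
      have hge0 : idx ≤ ax + t.2.2 := by simpa [pvEnds] using hge (by simp)
      rw [pvALoop]
      by_cases heq : ax + t.2.2 = idx
      · rw [if_pos heq]
        simp
        omega
      · have hgt : ax + t.2.2 > idx := by omega
        simp only [if_neg heq, if_pos hgt]
        simp; omega
    · obtain ⟨k', rfl⟩ : ∃ k', k = k' + 1 := ⟨k - 1, by omega⟩
      have hlt0 : (ax + t.2.2) < idx := by
        have := hlt 0 (by omega); simpa [pvEnds] using this
      rw [pvALoop]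
      simp only [if_neg (by omega : ¬ (ax + t.2.2 = idx)), if_neg (by omega : ¬ (ax + t.2.2 > idx))]
      rw [ih (ax + t.2.2) k' (by simpa using hk)
            (by intro j hj; have := hlt (j + 1) (by omega); simpa [pvEnds] using this)
            (by intro hlen; have := hge (by simpa using hlen); simpa [pvEnds] using this)]
      by_cases hke : k' = r.length
      · simp [hke]
      · simp only [if_neg hke, if_neg (by simpa using hke : ¬ (k' + 1 = (t :: r).length))]
        cases k' with
        | zero => simp [pvEnds]
        | succ k'' => simp [pvEnds]

-- ===== VERDICT (by name: the statement is the Claim_ definition above) =====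
theorem concatextIdx2SpanIdx_spec : Claim_equal_concatextIdx2SpanIdx := by
  intro threespans idx _hdom hpre
  unfold Spec_concatextIdx2SpanIdx concatextIdx2SpanIdx concatextIdx2SpanIdx_alt
  simp only [pvFold_eq threespans [] 0, List.nil_append]
  have hlen := pvEnds_length threespans 0
  have hmono := pvEnds_mono threespans 0 hpre
  obtain ⟨h1, h2, h3⟩ := pvBsearch_spec (pvEnds threespans 0) idx 0 (pvEnds threespans 0).length
    (fun i j hij hj => hmono i j hij (by omega)) (le_refl _) (Nat.zero_le _)
    (by omega) (by intro j hj hjl; omega)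
  set r := pvBsearch (pvEnds threespans 0) idx 0 (pvEnds threespans 0).length with hr
  rw [pvALoop_char threespans 0 idx r (by omega) h1
        (by intro hrl; exact h2 r (le_refl _) (by omega))]
  simp only [hlen]
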